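-- pv_equiv track=rewrite | github.com/EmilianoGrimaldi/Desafio-Stark | Desafío #03/stark_03.py | generar_codigo_heroe
-- ===== SOURCE A (Python) =====
-- def generar_codigo_heroe(id_heroe:int, genero_heroe:str):
--
--     if type(id_heroe) == int and (genero_heroe == "M" or genero_heroe == "F" or genero_heroe == "NB") and len(genero_heroe.strip()) > 0:
--         codigo_heroe = f"{genero_heroe}-{id_heroe}"
--         ceros = ""
--
--         while len(codigo_heroe) < 10:
--             ceros += "0"
--             codigo_heroe = f"{genero_heroe}-{ceros}{id_heroe}"
--             if len(codigo_heroe) == 10: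
--                 break
--
--         return codigo_heroe
--     else:
--         return "N/A"
-- ===== SOURCE B (Python) =====
-- def generar_codigo_heroe(id_heroe: int, genero_heroe: str):
--     if type(id_heroe) == int and genero_heroe in ("M", "F", "NB"):
--         num = str(id_heroe)
--         zeros = "0" * max(0, 10 - len(genero_heroe) - 1 - len(num))
--         return f"{genero_heroe}-{zeros}{num}"
--     return "N/A"
-- ===== Notes on version B (the rewrite author's own statement) =====
-- stated objective: simpler
-- what changed: Replaces A's zero-by-zero while loop (rebuilding the string each iteration) with a closed-form padding count: zeros = '0' * max(0, 10 - len(genero) - 1 - len(str(id))) inserted after the dash; the redundant strip() check is dropped since membership in {M,F,NB} already guarantees it.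
import Mathlib
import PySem

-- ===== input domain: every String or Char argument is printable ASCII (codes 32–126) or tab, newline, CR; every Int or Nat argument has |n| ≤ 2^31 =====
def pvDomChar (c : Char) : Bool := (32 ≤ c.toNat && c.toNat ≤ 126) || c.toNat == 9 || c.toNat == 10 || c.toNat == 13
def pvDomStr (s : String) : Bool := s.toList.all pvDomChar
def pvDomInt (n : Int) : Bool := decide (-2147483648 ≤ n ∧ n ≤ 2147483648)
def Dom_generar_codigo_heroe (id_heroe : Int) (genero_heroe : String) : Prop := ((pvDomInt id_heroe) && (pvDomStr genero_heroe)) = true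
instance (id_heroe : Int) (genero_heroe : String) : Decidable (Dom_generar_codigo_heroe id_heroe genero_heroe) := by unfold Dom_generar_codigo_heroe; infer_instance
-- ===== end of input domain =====

-- B replaces A's zero-by-zero while loop with a closed-form padding count (objective: simpler).

-- ===== PORT A =====
-- A's while loop: each pass appends one '0' to `ceros` and rebuilds the code string.
-- The loop runs at most 8 times (the code string is never empty); fuel 10 only makes it total.
def aLoop : Nat → List Char → List Char → List Char → List Char → List Char
  | 0, _, _, _, codigo => codigo
  | fuel + 1, g, idcs, ceros, codigo =>
    if codigo.length < 10 then
      let ceros' := ceros ++ ['0']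
      let codigo' := g ++ ['-'] ++ ceros' ++ idcs
      if codigo'.length = 10 then codigo'
      else aLoop fuel g idcs ceros' codigo'
    else codigo

-- type(id_heroe) == int is always true under the type convention (id_heroe : Int).
def generar_codigo_heroe (id_heroe : Int) (genero_heroe : String) : String :=
  if (genero_heroe = "M" ∨ genero_heroe = "F" ∨ genero_heroe = "NB")
      ∧ 0 < PySem.Str.len (PySem.Str.strip genero_heroe) then
    String.ofList (aLoop 10 genero_heroe.toList (PySem.Int.toChars id_heroe) []
      (genero_heroe.toList ++ ['-'] ++ PySem.Int.toChars id_heroe))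
  else "N/A"

-- ===== PORT B =====
def generar_codigo_heroe_alt (id_heroe : Int) (genero_heroe : String) : String :=
  if genero_heroe = "M" ∨ genero_heroe = "F" ∨ genero_heroe = "NB" then
    -- Nat subtraction clamps at 0, exactly Source B's max(0, 10 - len(g) - 1 - len(num))
    String.ofList (genero_heroe.toList ++ ['-']
      ++ List.replicate (10 - (genero_heroe.toList.length + 1 + (PySem.Int.toChars id_heroe).length)) '0'
      ++ PySem.Int.toChars id_heroe)
  else "N/A"

-- ===== PRECONDITION & SPEC =====
def Spec_generar_codigo_heroe (id_heroe : Int) (genero_heroe : String) (out : String) : Prop := out = generar_codigo_heroe_alt id_heroe genero_heroe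
instance (id_heroe : Int) (genero_heroe : String) (out : String) : Decidable (Spec_generar_codigo_heroe id_heroe genero_heroe out) := by unfold Spec_generar_codigo_heroe; infer_instance

-- ===== CLAIM (what is proved, stated in full; the proofs are below) =====
def Claim_equal_generar_codigo_heroe : Prop := ∀ (id_heroe : Int) (genero_heroe : String), Dom_generar_codigo_heroe id_heroe genero_heroe → Spec_generar_codigo_heroe id_heroe genero_heroe (generar_codigo_heroe id_heroe genero_heroe)

-- ===== LEMMAS AND PROOFS =====
-- Loop invariant: starting from c zeros already inserted, the loop appends exactly
-- enough further zeros to reach total length 10 (none if already ≥ 10).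
lemma aLoop_inv : ∀ (f c : Nat) (g idcs : List Char),
    10 - (g.length + 1 + c + idcs.length) ≤ f →
    aLoop f g idcs (List.replicate c '0') (g ++ ['-'] ++ List.replicate c '0' ++ idcs)
      = g ++ ['-'] ++ List.replicate (c + (10 - (g.length + 1 + c + idcs.length))) '0' ++ idcs := by
  intro f
  induction f with
  | zero =>
    intro c g idcs h
    have h0 : 10 - (g.length + 1 + c + idcs.length) = 0 := by omega
    simp [aLoop, h0]
  | succ f ih =>
    intro c g idcs h
    simp only [aLoop]
    have hL0 : (g ++ ['-'] ++ List.replicate c '0' ++ idcs).length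
        = g.length + 1 + c + idcs.length := by simp; omega
    have hL1 : (g ++ ['-'] ++ (List.replicate c '0' ++ ['0']) ++ idcs).length
        = g.length + 1 + (c + 1) + idcs.length := by simp; omega
    rw [hL0, hL1]
    by_cases hlt : g.length + 1 + c + idcs.length < 10
    · rw [if_pos hlt]
      by_cases h10 : g.length + 1 + (c + 1) + idcs.length = 10
      · rw [if_pos h10]
        have hc : c + (10 - (g.length + 1 + c + idcs.length)) = c + 1 := by omega
        rw [hc, List.replicate_succ']
      · rw [if_neg h10]
        rw [show List.replicate c '0' ++ ['0'] = List.replicate (c + 1) '0' from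
          List.replicate_succ'.symm]
        rw [ih (c + 1) g idcs (by omega)]
        have hc : c + 1 + (10 - (g.length + 1 + (c + 1) + idcs.length))
            = c + (10 - (g.length + 1 + c + idcs.length)) := by omega
        rw [hc]
    · rw [if_neg hlt]
      have h0 : 10 - (g.length + 1 + c + idcs.length) = 0 := by omega
      rw [h0, Nat.add_zero]

lemma main_eq (id_heroe : Int) (genero_heroe : String) :
    generar_codigo_heroe id_heroe genero_heroe = generar_codigo_heroe_alt id_heroe genero_heroe := by
  unfold generar_codigo_heroe generar_codigo_heroe_alt
  by_cases hg : genero_heroe = "M" ∨ genero_heroe = "F" ∨ genero_heroe = "NB"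
  · have hstrip : 0 < PySem.Str.len (PySem.Str.strip genero_heroe) := by
      rcases hg with h | h | h <;> subst h <;> decide
    rw [if_pos ⟨hg, hstrip⟩, if_pos hg]
    have h := aLoop_inv 10 0 genero_heroe.toList (PySem.Int.toChars id_heroe) (Nat.sub_le 10 _)
    simp only [List.replicate_zero, List.append_nil, Nat.zero_add, Nat.add_zero] at h
    rw [h]
  · rw [if_neg (fun hco => hg hco.1), if_neg hg]

-- ===== VERDICT (by name: the statement is the Claim_ definition above) =====
theorem generar_codigo_heroe_spec : Claim_equal_generar_codigo_heroe := by
  intro id_heroe genero_heroe _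
  unfold Spec_generar_codigo_heroe
  exact main_eq id_heroe genero_heroe
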